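/- GENERATED by mk_final_copies.py from the proof of the farm's unit `decode_residue.6ba` (farm:decode_residue.6ba.2: Lemmas.lean) as the
   re-elaboration sweep compiled it — do not edit. -/
import Asan.CheckWalk
import Vorbis.Spec.Units.decode_residue_6ba

/-
  LEMMAS of the proof unit `decode_residue.6ba` (the front of the body of the i-loop 2229, the `b < 0` arm, the latch). First part: the head start of `decode_residue.6b` (the body proper of the i-loop 2229, 0x10f579 … with the call at 0x10f538): the
  lemmas of the worker of decode_residue.6 (attempt 1) that the body needs (without the lemmas of the call's precondition: the call arm is decode_residue.6bb).
  Then the address arithmetic of decode_residue.4a's worked proof, `front6` (0x10f579 … 0x10f60e), `arm6` (0x10f60e … 0x10f634 + the latch), `body6ba`.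
-/
namespace Vorbis.Spec.decode_residue_6ba
open X86 X86.User Asan Vorbis Vorbis.Spec Vorbis.Spec.DecodeResidue

/-- The windows of the own stack frame that path A stores to between two cut points: `[RA−848, RA−248)` (below the steady
stack pointer), `class_set = [rbp−0xd8, +4)`, `[rbp−0xb8, +4)`, `[rbp−0x98, +4)`, `c_inter = [rbp−0x60, +4)`, `p_inter = [rbp−0x50, +4)`. -/
def ownWins (g : G) : List Span :=
  [⟨g.RA - 848, g.RA - 248⟩, ⟨g.RA - 224, g.RA - 220⟩, ⟨g.RA - 192, g.RA - 188⟩, ⟨g.RA - 160, g.RA - 156⟩,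
   ⟨g.RA - 104, g.RA - 100⟩, ⟨g.RA - 88, g.RA - 84⟩]

/-- Every window of `ownWins` lies inside the stack window `[RA − 848, RA)` of the contract's footprint. -/
theorem ownWins_stack (g : G) (hroom : 0x700000 + 848 ≤ g.RA) :
    ∀ w, w ∈ ownWins g → g.RA - 848 ≤ w.lo ∧ w.hi ≤ g.RA ∧ w.lo ≤ w.hi := by
  intro w hw
  simp only [ownWins, List.mem_cons, List.mem_nil_iff, or_false] at hw
  rcases hw with rfl | rfl | rfl | rfl | rfl | rfl <;> simp only [] <;> omega

/-- The value of a stack address `RA − k` as a number. -/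
theorem toNat_slot6 (g : G) (hroom : 0x700000 + 848 ≤ g.RA) (k : Nat) (hk : k ≤ 848) :
    (g.e.reg .rsp - UInt64.ofNat k).toNat = g.RA - k := by
  have e : (g.e.reg .rsp).toNat = g.RA := rfl
  have hlt := (g.e.reg .rsp).toNat_lt
  have hk' : (UInt64.ofNat k).toNat = k := by
    rw [UInt64.toNat_ofNat']
    exact Nat.mod_eq_of_lt (by omega)
  have hle : UInt64.ofNat k ≤ g.e.reg .rsp := by
    rw [UInt64.le_iff_toNat_le, hk', e]
    omega
  rw [UInt64.toNat_sub_of_le _ _ hle, hk', e]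

/-- **A slot of the frame outside `ownWins` reads the same**: `[RA − k, RA − k + n)` with `n ≤ k ≤ 848`, disjoint from the six
windows (for a literal `k`, `n` the last hypothesis is `by omega`). -/
theorem stack_read {g : G} {m m' : Mem} (hroom : 0x700000 + 848 ≤ g.RA ∧ g.RA + 8 ≤ 0x800000)
    (hs : Mem.SameExcept (ownWins g) m m') (k n : Nat) (hn : n ≤ k) (hk : k ≤ 848)
    (hoff : (848 ≤ k - n ∨ k ≤ 248) ∧ (224 ≤ k - n ∨ k ≤ 220) ∧ (192 ≤ k - n ∨ k ≤ 188) ∧ (160 ≤ k - n ∨ k ≤ 156) ∧ (104 ≤ k - n ∨ k ≤ 100) ∧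
      (88 ≤ k - n ∨ k ≤ 84)) :
    m'.readLE (g.e.reg .rsp - UInt64.ofNat k) n = m.readLE (g.e.reg .rsp - UInt64.ofNat k) n := by
  have e := toNat_slot6 g hroom.1 k hk
  apply hs.readLE
  · rw [e]
    omega
  · intro w hw
    rw [e]
    simp only [ownWins, List.mem_cons, List.mem_nil_iff, or_false] at hw
    rcases hw with rfl | rfl | rfl | rfl | rfl | rfl <;> simp only [] <;> omega

/-- A span that does not meet the stack region misses every window of `ownWins`. -/
theorem ownWins_off (g : G) (hroom : 0x700000 + 848 ≤ g.RA ∧ g.RA + 8 ≤ 0x800000) {lo hi : Nat}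
    (h : hi ≤ 0x700000 ∨ 0x800000 ≤ lo) : ∀ w, w ∈ ownWins g → hi ≤ w.lo ∨ w.hi ≤ lo := by
  intro w hw
  have := ownWins_stack g hroom.1 w hw
  omega

/-- **COMMON is kept by stores into the own frame's scratch windows** (`ownWins`): the frame facts FR read slots outside the
windows; the footprint grows inside its stack window; the shadow, `*f`, the temp block, the configuration lie off the stack.
The registers and the two state facts are the walker's. -/
theorem common_of_stack {u₀ : State} {g : G} (he : Entered u₀ g) {v v' : State} (c : Common u₀ g v)
    (hs : Mem.SameExcept (ownWins g) v.mem v'.mem)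
    (rbp : v'.reg .rbp = g.e.reg .rsp - 8) (rsp : v'.reg .rsp = g.e.reg .rsp - 248)
    (code : CodeOK u₀ v'.mem) (inv : abiInv v') : Common u₀ g v' := by
  have hroom := he.room
  have hob : g.Blk (objBlock g.f) := he.vorbis.obj
  have hobst := he.pre.free.offStack _ hob
  have hobin := he.pre.env.ok.inside _ hob
  simp only [vblock, voff] at hobst hobin
  -- a slot outside the windows
  have rd : ∀ (k n : Nat), n ≤ k → k ≤ 848 →
      ((848 ≤ k - n ∨ k ≤ 248) ∧ (224 ≤ k - n ∨ k ≤ 220) ∧ (192 ≤ k - n ∨ k ≤ 188) ∧ (160 ≤ k - n ∨ k ≤ 156) ∧ (104 ≤ k - n ∨ k ≤ 100) ∧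
        (88 ≤ k - n ∨ k ≤ 84)) →
      v'.mem.readLE (g.e.reg .rsp - UInt64.ofNat k) n = v.mem.readLE (g.e.reg .rsp - UInt64.ofNat k) n :=
    fun k n hn hk hoff => stack_read hroom hs k n hn hk hoff
  -- a span of `*f` is off the windows
  have offObj : ∀ lo hi : Nat, g.f ≤ lo → hi ≤ g.f + 1808 → ∀ w, w ∈ ownWins g → hi ≤ w.lo ∨ w.hi ≤ lo := by
    intro lo hi h1 h2
    exact ownWins_off g hroom (by omega)
  apply Common.of_frame he rbp rsp code inv
  · exact (congrArg UInt64.ofNat (rd 8 8 (by omega) (by omega) (by omega))).trans c.s_rbp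
  · exact (congrArg UInt64.ofNat (rd 16 8 (by omega) (by omega) (by omega))).trans c.s_r15
  · exact (congrArg UInt64.ofNat (rd 24 8 (by omega) (by omega) (by omega))).trans c.s_r14
  · exact (congrArg UInt64.ofNat (rd 32 8 (by omega) (by omega) (by omega))).trans c.s_r13
  · exact (congrArg UInt64.ofNat (rd 40 8 (by omega) (by omega) (by omega))).trans c.s_r12
  · exact (congrArg UInt64.ofNat (rd 48 8 (by omega) (by omega) (by omega))).trans c.s_rbx
  · exact (congrArg UInt64.ofNat (rd 184 8 (by omega) (by omega) (by omega))).trans c.fr_f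
  · exact (congrArg UInt64.ofNat (rd 216 8 (by omega) (by omega) (by omega))).trans c.fr_rb
  · exact (rd 156 4 (by omega) (by omega) (by omega)).trans c.fr_ch
  · exact (rd 196 4 (by omega) (by omega) (by omega)).trans c.fr_prd
  · exact (rd 200 4 (by omega) (by omega) (by omega)).trans c.fr_w
  · exact (rd 232 4 (by omega) (by omega) (by omega)).trans c.fr_rtype
  · exact (rd 176 8 (by omega) (by omega) (by omega)).trans c.fr_pcd
  · exact (rd 240 8 (by omega) (by omega) (by omega)).trans c.fr_si
  · -- the footprint: the windows lie inside its stack window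
    apply c.same.trans
    apply hs.mono
    intro w hw a h1 h2
    have hw' := ownWins_stack g hroom.1 w hw
    refine ⟨⟨(g.e.reg .rsp).toNat - 848, (g.e.reg .rsp).toNat⟩, ?_, ?_, ?_⟩
    · unfold Spec.footprint
      exact List.mem_cons_self ..
    · show (g.e.reg .rsp).toNat - 848 ≤ a
      have e : (g.e.reg .rsp).toNat = g.RA := rfl
      omega
    · show a < (g.e.reg .rsp).toNat
      have e : (g.e.reg .rsp).toNat = g.RA := rfl
      omega
  · -- the shadow layer: no shadow byte is on the stack
    apply c.shadow.untouched
    exact hs.eqOn _ _ (ownWins_off g hroom (by omega))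
  · -- Bits: the four windows of `*f` it reads
    apply c.point.vorbis.bits.frame_fields
    apply Bits.SameFields.of_sameExcept hs
    · exact offObj _ _ (by omega) (by omega)
    · exact offObj _ _ (by omega) (by omega)
    · exact offObj _ _ (by omega) (by omega)
    · exact offObj _ _ (by omega) (by omega)
  · -- ADOBusy: the arena fields of `*f`
    have hb : ADOBusy g.A' g.others' v.mem g.f g.sz := c.point.busy
    apply hb.transfer
    apply ObjEq.of_sameExcept hs
    · intro w hw
      have := (by decide : WinsBelow ADO.wins 1808) w hw
      omega
    · intro w hw s hsp
      have hb' := (by decide : WinsBelow ADO.wins 1808) w hw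
      have hw1 : w.1 ≤ w.2 ∨ w.2 ≤ w.1 := by omega
      exact offObj (g.f + w.1) (g.f + w.2) (by omega) (by omega) s hsp
  · -- TB: the temp block lies in the arena, off the stack
    have hb : ADOBusy g.A' g.others' v.mem g.f g.sz := c.point.busy
    have ht := hb.ok.tblock_off c.tblock
    have hsz := c.tb.size
    have h3 : g.C * (8 + 8 * g.PRD) = g.C * 8 + g.C * (8 * g.PRD) := Nat.mul_add _ _ _
    apply c.tb.frame
    apply Block.Kept.of_sameExcept hs
    · intro w hw
      have := ownWins_off g hroom (lo := g.TB.base) (hi := g.TB.base + g.TB.size) (by omega) w hw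
      simp only []
      omega
    · simp only []
      omega
  · -- μ reads `*f` only
    have e : mu v'.mem g.f = mu v.mem g.f := by
      apply mu_frame (by omega)
      · exact hs.eqOn _ _ (offObj _ _ (by omega) (by omega))
      · exact hs.eqOn _ _ (offObj _ _ (by omega) (by omega))
      · exact hs.eqOn _ _ (offObj _ _ (by omega) (by omega))
      · exact hs.eqOn _ _ (offObj _ _ (by omega) (by omega))
    rw [e]
    exact c.mu_le

/-- **`cdq ; idiv` of a small non-negative dividend by a small positive divisor does not fault** and gives the unsigned quotient
and remainder (bit-vector form, closed: `bv_decide`). -/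
theorem idiv_small (z d : BitVec 32) (hz : z ≤ 8192#32) (hd1 : 1#32 ≤ d) (hd : d ≤ 16#32) :
    Alu.div true (if z.msb = true then BitVec.allOnes 32 else 0) z d = some (z / d, z % d) := by
  have h0 : (d == 0) = false := by bv_decide
  have hm : z.msb = false := by bv_decide
  have h1 : (((((0 : BitVec 32) ++ z).sdiv (d.signExtend (32 + 32))).setWidth 32).signExtend (32 + 32) !=
      ((0 : BitVec 32) ++ z).sdiv (d.signExtend (32 + 32))) = false := by bv_decide
  have h2 : (((0 : BitVec 32) ++ z).sdiv (d.signExtend (32 + 32))).setWidth 32 = z / d := by bv_decide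
  have h3 : (((0 : BitVec 32) ++ z).srem (d.signExtend (32 + 32))).setWidth 32 = z % d := by bv_decide
  unfold Alu.div
  simp only [hm, h0, Bool.false_eq_true, if_false, h1]
  rw [h2, h3]
  exact if_pos trivial

/-- The same over numbers: the dividend `z ≤ 8192` and the divisor `1 ≤ d ≤ 16` as 32-bit vectors. -/
theorem idiv_nat (z d : Nat) (hz : z ≤ 8192) (hd1 : 1 ≤ d) (hd : d ≤ 16) :
    Alu.div true (if (BitVec.ofNat 32 z).msb = true then BitVec.allOnes 32 else 0) (BitVec.ofNat 32 z) (BitVec.ofNat 32 d) =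
      some (BitVec.ofNat 32 (z / d), BitVec.ofNat 32 (z % d)) := by
  have ez : (BitVec.ofNat 32 z).toNat = z := by
    rw [BitVec.toNat_ofNat]
    exact Nat.mod_eq_of_lt (by omega)
  have ed : (BitVec.ofNat 32 d).toNat = d := by
    rw [BitVec.toNat_ofNat]
    exact Nat.mod_eq_of_lt (by omega)
  have hq : z / d ≤ z := Nat.div_le_self _ _
  have hr : z % d < d := Nat.mod_lt _ (by omega)
  rw [idiv_small]
  · congr 1
    congr 1
    · apply BitVec.eq_of_toNat_eq
      rw [BitVec.toNat_udiv, ez, ed, BitVec.toNat_ofNat]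
      exact (Nat.mod_eq_of_lt (by omega)).symm
    · apply BitVec.eq_of_toNat_eq
      rw [BitVec.toNat_umod, ez, ed, BitVec.toNat_ofNat]
      exact (Nat.mod_eq_of_lt (by omega)).symm
  · rw [BitVec.le_def, ez]
    exact hz
  · rw [BitVec.le_def, ed]
    exact hd1
  · rw [BitVec.le_def, ed]
    exact hd

/-- **A field of the record `r`** (`r + off`, `n` bytes inside the 32-byte record): a check site, in the live set inside the
function (R2 + P1). -/
theorem rec_site {u₀ : State} {g : G} (he : Entered u₀ g) {v : State} (c : Common u₀ g v) (off n : Nat)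
    (hoff : off + n ≤ 32) (hn : 1 ≤ n) : Site g.Live' (g.r + off) n := by
  have hr : ResidueOK g.Blk v.mem g.f := c.point.vorbis.residue
  apply hr.site_record c.point.env.live (c.rn_lt he) off n _ hn
  · rw [c.config_at]
  · simp only [voff]
    omega

/-- **Where the record is**: in the data space, off the stack region (R2, `BlkOK`, `BlkFree.offStack`). -/
theorem rec_where {u₀ : State} {g : G} (he : Entered u₀ g) :
    0x100000 ≤ g.r ∧ g.r + 32 ≤ 0xC00000 ∧ (g.r + 32 ≤ 0x700000 ∨ 0x800000 ≤ g.r) := by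
  have hR : ResidueOK g.Blk g.e.mem g.f := he.vorbis.residue
  have h2 := hR.R2
  have hin := he.pre.env.ok.inside _ h2
  have hst := he.pre.free.offStack _ h2
  have hlt := he.args.rn_lt
  have h1 := hR.R1
  have hlt' : g.rn < (stb_vorbis.residue_count g.e.mem g.f).toNat := by omega
  have er : g.r = stb_vorbis.residue_config g.e.mem g.f + 32 * g.rn := by
    unfold G.r stb_vorbis.residue_config_at
    simp only [voff]
  simp only [voff] at hin hst
  omega

/-- **The bounds of the arguments**: `n ≤ 4096` (P1 + HD3), `ch ≤ C ≤ 16` (P2 + HD1). -/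
theorem arg_bounds {u₀ : State} {g : G} (he : Entered u₀ g) : g.n ≤ 4096 ∧ g.ch ≤ g.C ∧ g.C ≤ 16 := by
  have hh := he.vorbis.header
  obtain ⟨a, b, h6, hab, hb, e0, e1⟩ := hh.HD3
  have h1 := hh.HD1
  have hn := he.args.n_le
  have hc := he.args.ch_le
  have hp : 2 ^ b ≤ 2 ^ 13 := Nat.pow_le_pow_right (by decide) hb
  have eb : bsize g.e.mem g.f 1 = 2 ^ b := by
    unfold bsize
    rw [if_neg (by decide), e1]
    exact Int.toNat_natCast _
  have eC : g.C = (stb_vorbis.channels g.e.mem g.f).toNat := rfl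
  refine ⟨?_, hc, ?_⟩
  · rw [eb] at hn
    omega
  · omega

/-- **Fact K on path A** in the memory of a cut point: for `pc < part_read`, `1 ≤ part_size` (R5) and
`z(pc) + part_size ≤ n·ch`, `≤ 8192` (so neither the 32-bit `imul` / `add` nor the `idiv` overflows). -/
theorem factK_A {u₀ : State} {g : G} (he : Entered u₀ g) {v : State} (c : Common u₀ g v) (h2 : g.rtype = 2)
    (hch : 2 ≤ g.ch) {pc : Nat} (hpc : pc < g.PRD) :
    1 ≤ Residue.part_size v.mem g.r ∧
    Residue.begin v.mem g.r + pc * Residue.part_size v.mem g.r + Residue.part_size v.mem g.r ≤ g.n * g.ch ∧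
    Residue.begin v.mem g.r + pc * Residue.part_size v.mem g.r + Residue.part_size v.mem g.r ≤ 8192 := by
  have hres := c.resAt he
  have hb := arg_bounds he
  have e := c.prd
  rw [h2] at e
  have hK := Residue.factK hres (A := Res.actualDec 2 g.n) (pc := pc) (by rw [e]; exact hpc)
  have ha := Res.actualDec_le 2 g.n
  refine ⟨hres.R5.1, ?_, by omega⟩
  apply Residue.factK_pos hres hch
  rw [e]
  exact hpc

/-- Every allocated block is kept by stores into `ownWins` (no allocated block meets the stack region). -/
theorem blks_kept_of_stack {u₀ : State} {g : G} (he : Entered u₀ g) {m m' : Mem} (hs : Mem.SameExcept (ownWins g) m m') :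
    AllKept g.Blk m m' := by
  apply AllKept.of_sameExcept he.pre.env.ok hs
  intro B hB
  exact ownWins_off g he.room (he.pre.free.offStack B hB)

/-- The temp block is kept by stores into `ownWins` (it lies in the arena, off the stack). -/
theorem tb_kept_of_stack {u₀ : State} {g : G} (he : Entered u₀ g) {v : State} (c : Common u₀ g v) {m' : Mem}
    (hs : Mem.SameExcept (ownWins g) v.mem m') : g.TB.Kept v.mem m' := by
  have hb : ADOBusy g.A' g.others' v.mem g.f g.sz := c.point.busy
  have ht := hb.ok.tblock_off c.tblock
  apply Block.Kept.of_sameExcept hs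
  · exact ownWins_off g he.room (by omega)
  · omega

/-- The record's reads are kept by stores into `ownWins`. -/
theorem reads_of_stack {u₀ : State} {g : G} (he : Entered u₀ g) {v : State} (c : Common u₀ g v) {m' : Mem}
    (hs : Mem.SameExcept (ownWins g) v.mem m') : ResidueReads v.mem g.f m' g.f g.r := by
  have hroom := he.room
  have hak := blks_kept_of_stack he hs
  have hob : g.Blk (objBlock g.f) := he.vorbis.obj
  have hobst := he.pre.free.offStack _ hob
  have hobin := he.pre.env.ok.inside _ hob
  simp only [vblock, voff] at hobst hobin
  have hv : Real.VorbisOK g.len g.Blk v.mem g.f := c.point.vorbis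
  have hcfg := hv.config
  have hR : ResidueOK g.Blk v.mem g.f := hv.residue
  have hres := c.resAt he
  apply ResidueReads.of_kept
  · apply ObjEq.of_sameExcept hs
    · intro w hw
      have := (by decide : WinsBelow ResidueAtOK.wins 1808) w hw
      omega
    · intro w hw s hsp
      have hb' := (by decide : WinsBelow ResidueAtOK.wins 1808) w hw
      exact ownWins_off g hroom (lo := g.f + w.1) (hi := g.f + w.2) (by omega) s hsp
  · -- the record lies in the `residue_config` block
    have hlt := c.rn_lt he
    have h1 := hR.R1
    have hlt' : g.rn < (stb_vorbis.residue_count v.mem g.f).toNat := by omega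
    have er := c.config_at
    apply (hak _ hR.R2).mono
    · show stb_vorbis.residue_config v.mem g.f ≤ g.r
      rw [← er]
      unfold stb_vorbis.residue_config_at
      omega
    · show g.r + Off.sizeof.Residue ≤
        stb_vorbis.residue_config v.mem g.f + Off.sizeof.Residue * (stb_vorbis.residue_count v.mem g.f).toNat
      rw [← er]
      unfold stb_vorbis.residue_config_at
      simp only [voff]
      omega
  · -- the class book's header lies in the codebooks block
    have h7 := hres.R7
    have hlt' : Residue.classbook v.mem g.r < (stb_vorbis.codebook_count v.mem g.f).toNat := by omega
    apply (hak _ hcfg.cb0.F2).mono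
    · show stb_vorbis.codebooks v.mem g.f ≤ Residue.cbk v.mem g.f g.r
      unfold Residue.cbk stb_vorbis.codebooks_at
      omega
    · show Residue.cbk v.mem g.f g.r + 8 ≤
        stb_vorbis.codebooks v.mem g.f + Off.sizeof.Codebook * (stb_vorbis.codebook_count v.mem g.f).toNat
      unfold Residue.cbk stb_vorbis.codebooks_at
      simp only [voff]
      omega

/-- FILL of a row of the temp block is kept by stores into `ownWins`. -/
theorem fill_of_stack {u₀ : State} {g : G} (he : Entered u₀ g) {v : State} (c : Common u₀ g v) {m' : Mem}
    (hs : Mem.SameExcept (ownWins g) v.mem m') {j m : Nat} (hj : j < g.C) (hm : m ≤ g.PRD)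
    (h : Fill v.mem g.f g.r g.TB g.C g.PRD j m) : Fill m' g.f g.r g.TB g.C g.PRD j m := by
  apply h.frame hj hm c.tb.size (tb_kept_of_stack he c hs) (reads_of_stack he c hs)
  exact blks_kept_of_stack he hs _ (c.resAt he).R8a

/-- WA is kept by stores into `ownWins` (`3 ≤ ch ≤ C`: row 0 exists). -/
theorem winv_of_stack {u₀ : State} {g : G} (he : Entered u₀ g) {v : State} (c : Common u₀ g v) {m' : Mem}
    (hs : Mem.SameExcept (ownWins g) v.mem m') (hC : 1 ≤ g.C) {pass cs pcount : Nat}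
    (h : WInv v.mem g.f g.r g.TB g.C g.PRD g.W g.rowsA pass cs pcount) :
    WInv m' g.f g.r g.TB g.C g.PRD g.W g.rowsA pass cs pcount := by
  apply h.frame (fun j hj => hj) _ (c.w_pos he)
  intro j m hj hf hm
  have e : j = 0 := hj
  exact fill_of_stack he c hs (by omega) hm hf

/-- The invariant of the i-loop is kept by stores into `ownWins`. -/
theorem winner_of_stack {u₀ : State} {g : G} (he : Entered u₀ g) {v : State} (c : Common u₀ g v) {m' : Mem}
    (hs : Mem.SameExcept (ownWins g) v.mem m') (hC : 1 ≤ g.C) {pass cs i pcount : Nat}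
    (h : WInnerInv v.mem g.f g.r g.TB g.C g.PRD g.W g.rowsA pass cs i pcount) :
    WInnerInv m' g.f g.r g.TB g.C g.PRD g.W g.rowsA pass cs i pcount := by
  apply h.frame (fun j hj => hj) _ (c.w_pos he)
  intro j m hj hf hm
  have e : j = 0 := hj
  exact fill_of_stack he c hs (by omega) hm hf

/-- `part_read ≤ actual_size ≤ 2·n ≤ 8192`. -/
theorem prd_le {u₀ : State} {g : G} (he : Entered u₀ g) : g.PRD ≤ 8192 := by
  have hb := arg_bounds he
  have ha := Res.actualDec_le (stb_vorbis.residue_types g.e.mem g.f g.rn) g.n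
  have h := Res.partRead_le (Residue.begin g.e.mem g.r) (Residue.end_ g.e.mem g.r) (Residue.part_size g.e.mem g.r)
    (Res.actualDec (stb_vorbis.residue_types g.e.mem g.f g.rn) g.n)
  have e : g.PRD = Res.partRead (Residue.begin g.e.mem g.r) (Residue.end_ g.e.mem g.r) (Residue.part_size g.e.mem g.r)
    (Res.actualDec (stb_vorbis.residue_types g.e.mem g.f g.rn) g.n) := rfl
  omega

/-- The low half of the word of a small number. -/
theorem part32_small6 (n : Nat) (h : n < 2 ^ 32) : Word.part Width.w32 (UInt64.ofNat n) = BitVec.ofNat 32 n := by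
  apply BitVec.eq_of_toNat_eq
  rw [Asan.part32_toNat, UInt64.toNat_ofNat', BitVec.toNat_ofNat, Nat.mod_eq_of_lt (by omega : n < 2 ^ 64)]

/-- **`z = r->begin + pcount * r->part_size`** as the walker computes it (`imul eax, …` ; `add eax, ebx`): the 32-bit vector of
the number (no bound is needed: `BitVec.ofNat` is a ring homomorphism). -/
theorem z32 (pcount psz bg : Nat) (h : pcount < 2 ^ 32) :
    Word.part Width.w32 (UInt64.ofNat pcount) * BitVec.ofNat 32 psz + BitVec.ofNat 32 bg =
      BitVec.ofNat 32 (bg + pcount * psz) := by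
  rw [part32_small6 pcount h, ← BitVec.ofNat_mul, ← BitVec.ofNat_add, Nat.add_comm]

/-- The signed value of a small number's 32-bit vector. -/
theorem toInt_small32 (n : Nat) (h : n < 2 ^ 31) : (BitVec.ofNat 32 n).toInt = (n : Int) := by
  have e : (BitVec.ofNat 32 n).toNat = n := by
    rw [BitVec.toNat_ofNat]
    exact Nat.mod_eq_of_lt (by omega)
  rw [toInt_of_lt _ (by omega), e]

/-- The word of a stack address `RA − k`. -/
theorem addr_slot (g : G) (hroom : 0x700000 + 848 ≤ g.RA) (k : Nat) (hk : k ≤ 848) :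
    addr (g.RA - k) = g.e.reg .rsp - UInt64.ofNat k :=
  (eq_addr _ _ (toNat_slot6 g hroom k hk)).symm

/-- `PathA` (the pass, `tap` and `n` slots) is kept by stores into `ownWins`. -/
theorem patha_of_stack {u₀ : State} {g : G} (he : Entered u₀ g) {v v' : State} (hs : Mem.SameExcept (ownWins g) v.mem v'.mem)
    {pass : Nat} (p : PathA g pass v) : PathA g pass v' := by
  have hroom := he.room
  refine ⟨p.rtype2, p.ch_ge, p.pass_le, ?_, ?_, ?_⟩
  · exact (stack_read hroom hs 168 4 (by omega) (by omega) (by omega)).trans p.sl_pass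
  · exact (stack_read hroom hs 228 4 (by omega) (by omega) (by omega)).trans p.sl_tap
  · exact (stack_read hroom hs 208 4 (by omega) (by omega) (by omega)).trans p.sl_n

/-- **CI from the two ints just stored**: `c_inter = z % ch`, `p_inter = z / ch` read back from the frame, `z ≤ n·ch`. -/
theorem inter_of_z {u₀ : State} {g : G} (he : Entered u₀ g) {m : Mem} {z : Nat} (hch : 1 ≤ g.ch) (hz : z ≤ g.n * g.ch)
    (hz31 : z < 2 ^ 31)
    (hc : m.readLE (g.e.reg .rsp - 104) 4 = z % g.ch) (hp : m.readLE (g.e.reg .rsp - 88) 4 = z / g.ch) :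
    InterAt m g.ci g.pi g.ch g.n := by
  have hroom := he.room
  have hq : z / g.ch ≤ z := Nat.div_le_self _ _
  have hr : z % g.ch ≤ z := Nat.mod_le _ _
  apply InterAt.of_z hch hz
  · unfold Mem.i32 Mem.u32 G.ci
    rw [addr_slot g hroom.1 104 (by omega)]
    show sint32 (m.readLE (g.e.reg .rsp - 104) 4) = _
    rw [hc]
    unfold sint32
    rw [if_pos (by omega)]
  · unfold Mem.i32 Mem.u32 G.pi
    rw [addr_slot g hroom.1 88 (by omega)]
    show sint32 (m.readLE (g.e.reg .rsp - 88) 4) = _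
    rw [hp]
    unfold sint32
    rw [if_pos (by omega)]

/-- 0x10f628: `idiv DWORD PTR [rbp-0x94]` of the `b < 0` arm (C 2243). -/
abbrev idivArm : Word := Vorbis.L.decode_residue.cut22 - 36

/-- The `setl` / `test` pair of a signed comparison: the byte is 0 iff the comparison fails. -/
theorem setl_zero (a b : Int) : (if a < b then (1 : BitVec 8) else 0).toNat = 0 ↔ ¬ a < b := by
  split
  · simp_all
  · simp_all

/-- `classwords` is the value of an `int`: below 2^31. -/
theorem w_lt (g : G) : g.W < 2 ^ 31 := by
  have e : g.W = (sint32 (g.e.mem.u32 (Residue.cbk g.e.mem g.f g.r + Off.Codebook.dimensions))).toNat := rfl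
  rcases sint32_cases (g.e.mem.u32 (Residue.cbk g.e.mem g.f g.r + Off.Codebook.dimensions)) with ⟨h1, h2⟩ | ⟨h1, h2⟩
  · rw [e, h2]
    omega
  · have hlt : g.e.mem.u32 (Residue.cbk g.e.mem g.f g.r + Off.Codebook.dimensions) < 2 ^ 32 := by
      unfold Mem.u32
      exact Mem.readLE_lt _ _ 4
    rw [e, h2]
    omega

/-! ### The address arithmetic of the front (from the worked proof of decode_residue.4a) -/

set_option maxRecDepth 4000
set_option maxHeartbeats 4000000

/-- Where the temp block lies: inside the data space, off the stack region (`ADOBusy.tblock`, `ArenaOK.tblock_range`, AR1, AR1x). -/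
theorem tb_where {u₀ : State} {g : G} {v : State} (hc : Common u₀ g v) :
    0x100000 ≤ g.TB.base ∧ g.TB.base + g.TB.size ≤ 0xC00000 ∧
      (g.TB.base + g.TB.size ≤ 0x700000 ∨ 0x800000 ≤ g.TB.base) := by
  have htb := hc.tblock
  have hrange := hc.point.busy.ok.tblock_range htb
  have h1x := hc.point.busy.ok.AR1x
  have har1 := hc.point.busy.ok.AR1
  have hr8 := le_r8 g.TB.size
  omega

/-- `movsxd rbx, [class_set] ; shl rbx, k` for a small non-negative int: the scaled index as a number. -/
theorem sext_shl (x k : Nat) (hx : x < 2 ^ 31) (hk : k < 8) :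
    Word.ofBV (BitVec.signExtend 64 (BitVec.ofNat 32 x)) <<< (UInt64.ofNat k) = addr (2 ^ k * x) := by
  have e1 : (Word.ofBV (BitVec.signExtend 64 (BitVec.ofNat 32 x))).toNat = x := by
    rw [toNat_sext32 _ (by rw [toNat_ofNat32 x (by omega)]; exact hx), toNat_ofNat32 x (by omega)]
  apply eq_addr
  rw [UInt64.toNat_shiftLeft, e1, UInt64.toNat_ofNat', Nat.shiftLeft_eq]
  have h2 : k % 2 ^ 64 % 64 = k := by omega
  rw [h2]
  have : 2 ^ k ≤ 128 := by
    have : k ≤ 7 := by omega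
    calc 2 ^ k ≤ 2 ^ 7 := Nat.pow_le_pow_right (by omega) this
      _ = 128 := by decide
  have hm : x * 2 ^ k < 2 ^ 64 := by
    have := Nat.mul_le_mul (Nat.le_of_lt hx) this
    omega
  rw [Nat.mod_eq_of_lt hm, Nat.mul_comm]


/-- The walker's form of `lea edx, [rbx + rax]`: the low half of the 64-bit sum of two zero-extended 32-bit values. -/
theorem z_lea (x y : BitVec 32) :
    (BitVec.setWidth 32 (Word.ofBV x + Word.ofBV y).toBitVec).toNat = (x.toNat + y.toNat) % 2 ^ 32 := by
  rw [BitVec.toNat_setWidth, UInt64.toNat_toBitVec, UInt64.toNat_add, toNat_ofBV32, toNat_ofBV32]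
  have := x.isLt
  have := y.isLt
  omega

/-- `movsxd r12, [pass]` for a small non-negative int. -/
theorem sext32_small6 (x : Nat) (hx : x < 2 ^ 31) : Word.ofBV (BitVec.signExtend 64 (BitVec.ofNat 32 x)) = addr x := by
  apply eq_addr
  rw [toNat_sext32 _ (by rw [toNat_ofNat32 x (by omega)]; exact hx), toNat_ofNat32 x (by omega)]

/-- `movzx ebx, BYTE [rbx] ; movzx ebx, bl ; shl rbx, 4`: the class number times 16. -/
theorem zext_shl4 (c : Nat) (hc : c < 256) :
    Word.ofBV (BitVec.setWidth 64 (BitVec.zeroExtend 32 (BitVec.setWidth 8 (BitVec.zeroExtend 32 (BitVec.ofNat 8 c))))) <<< 4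
      = addr (16 * c) := by
  apply eq_addr
  have e : (Word.ofBV (BitVec.setWidth 64 (BitVec.zeroExtend 32 (BitVec.setWidth 8 (BitVec.zeroExtend 32
      (BitVec.ofNat 8 c)))))).toNat = c := by
    unfold Word.ofBV
    simp only [UInt64.toNat_ofBitVec, BitVec.toNat_setWidth, BitVec.zeroExtend, BitVec.toNat_ofNat]
    omega
  show (_ <<< (UInt64.ofNat 4)).toNat = _
  rw [UInt64.toNat_shiftLeft, e, UInt64.toNat_ofNat', Nat.shiftLeft_eq]
  have h2 : 4 % 2 ^ 64 % 64 = 4 := by decide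
  rw [h2]
  omega


/-- `movsxd rax, r13d` for a small non-negative int. -/
theorem sext_part (x : Nat) (hx : x < 2 ^ 31) :
    Word.ofBV (BitVec.signExtend 64 (Word.part Width.w32 (UInt64.ofNat x))) = addr x := by
  have e : (Word.part Width.w32 (UInt64.ofNat x)).toNat = x := by
    rw [Asan.part32_toNat, UInt64.toNat_ofNat']
    omega
  apply eq_addr
  rw [toNat_sext32 _ (by rw [e]; exact hx), e]

/-- Bit 15 of a 16-bit value (a `BitVec` fact, by `bv_decide`). -/
theorem bit15_bv (x : BitVec 16) : (x &&& 32768#16) = 0#16 ↔ x < 32768#16 := by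
  bv_decide

/-- `test bx, 0x8000`: the sign of `b = residue_books[c][pass]`. -/
theorem bit15 (b : Nat) (hb : b < 65536) :
    (Word.part Width.w16 (UInt64.ofNat b) &&& 32768#16).toNat = 0 ↔ b < 32768 := by
  have e : (Word.part Width.w16 (UInt64.ofNat b)).toNat = b := by
    unfold Word.part
    simp only [Width.bits, BitVec.toNat_setWidth, UInt64.toNat_toBitVec, UInt64.toNat_ofNat']
    omega
  have h := bit15_bv (Word.part Width.w16 (UInt64.ofNat b))
  rw [BitVec.lt_def, e] at h
  have e0 : (32768#16).toNat = 32768 := by decide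
  rw [e0] at h
  rw [← h]
  constructor
  · intro h0
    apply BitVec.eq_of_toNat_eq
    rw [h0]
    rfl
  · intro h0
    rw [h0]
    rfl

/-- `add r13d, 1` on a small counter. -/
theorem incr32 (x : Nat) (hx : x + 1 < 2 ^ 32) :
    Word.ofBV (Word.part Width.w32 (UInt64.ofNat x) + 1#32) = UInt64.ofNat (x + 1) := by
  apply UInt64.toNat_inj.mp
  rw [toNat_ofBV32, BitVec.toNat_add, Asan.part32_toNat, UInt64.toNat_ofNat', UInt64.toNat_ofNat']
  have e1 : (1#32).toNat = 1 := by decide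
  rw [e1]
  omega

/-! ### The front of the body: 0x10f579 … 0x10f60e -/

/-- 0x10f5c4 (`mov rdi, rbx`): rbx = `&part_classdata[0][class_set]`. -/
abbrev stopSlot : Word := Vorbis.L.decode_residue.at_10f579 + 0x4b

/-- 0x10f5d8 (`mov rdi, rcx`): rbx = rcx = the address of the class byte. -/
abbrev stopClass : Word := Vorbis.L.decode_residue.at_10f579 + 0x5f

/-- 0x10f600 (`lea rdi, [rbx + r14*2]`): rbx = `&residue_books[c]`, r14 = `pass`. -/
abbrev stopBook : Word := Vorbis.L.decode_residue.at_10f579 + 0x87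

/-- 0x10f60e (`test bx, 0x8000`): `b = residue_books[c][pass]` in ebx. -/
abbrev stopSign : Word := Vorbis.L.decode_residue.at_10f579 + 0x95

/-- **0x10f60e (`stopSign`), inside the body of the i-loop 2229, `b` in ebx** (an assertion of this proof only; the twin of
`AtB L.decode_residue.at_10f260` of segment 4): everything of `AtTurn`; `[rbp−0xb8] = r->part_size`; `[rbp−0x98] = z`; `ebx = b` as
an unsigned 16-bit value; R8c for its signed reading. -/
structure AtSign6 (u₀ : State) (g : G) (pass cs i pcount b : Nat) (v : State) : Prop where
  /-- at `test bx, 0x8000` -/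
  rip : v.rip = stopSign
  /-- COMMON -/
  common : Common u₀ g v
  /-- the variant `ch > 2` -/
  ch3 : 3 ≤ g.ch
  /-- `r12 = r` -/
  r12 : v.reg .r12 = UInt64.ofNat g.r
  /-- path A -/
  path : PathA g pass v
  /-- `r15d = pcount` -/
  r15 : v.reg .r15 = UInt64.ofNat pcount
  /-- `r13d = i` -/
  r13 : v.reg .r13 = UInt64.ofNat i
  /-- `[rbp−0xd8] = class_set` -/
  sl_cs : v.mem.readLE (g.e.reg .rsp - 224) 4 = cs
  /-- the invariant of the i-loop -/
  wi : WInnerInv v.mem g.f g.r g.TB g.C g.PRD g.W g.rowsA pass cs i pcount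
  /-- CI -/
  inter : InterAt v.mem g.ci g.pi g.ch g.n
  /-- `i < classwords` -/
  i_lt : i < g.W
  /-- `pcount < part_read` -/
  lt : pcount < g.PRD
  /-- `[rbp−0xb8] = r->part_size` -/
  sl_psz : v.mem.readLE (g.e.reg .rsp - 192) 4 = Residue.part_size g.e.mem g.r
  /-- `[rbp−0x98] = z(pcount)` -/
  sl_z : v.mem.readLE (g.e.reg .rsp - 160) 4 = Residue.begin g.e.mem g.r + pcount * Residue.part_size g.e.mem g.r
  /-- `rbx = b`, zero-extended from 16 bits -/
  rbx : v.reg .rbx = UInt64.ofNat b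
  /-- `b` is a 16-bit value -/
  b_lt : b < 65536
  /-- R8c -/
  book : sint16 b = -1 ∨ (0 ≤ sint16 b ∧ sint16 b < stb_vorbis.codebook_count v.mem g.f)

/-- **The front of the body of the i-loop 2229** (0x10f579 … 0x10f60e; C 2230–2236): `z`, `c = part_classdata[0][class_set][i]`,
`b = r->residue_books[c][pass]`: seven check sites. Four staged walks: the three computed addresses are restated as numbers in
between (the port of `body_front` of decode_residue.4a: `r` in r12, r14 scratch). -/
theorem front6 {Lay : Layout} (hLay : Lay.hi = 0x1000000) {μ : Microarch} (hμ : UserX.MicroOK μ) {u₀ : State}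
    (hcode : HasCodeNat Lay u₀ Vorbis.L.decode_residue.entry Vorbis.Code.code_decode_residue.nat Vorbis.L.decode_residue.size)
    (h_load8 : Asan.SmallCheck Lay μ Vorbis.WayInv (Vorbis.CodeOK u₀) [.rax, .rcx, .rdx] 8 Vorbis.L.__asan_load8_noabort.entry)
    (h_load4 : Asan.SmallCheck Lay μ Vorbis.WayInv (Vorbis.CodeOK u₀) [.rax, .rcx, .rdx] 4 Vorbis.L.__asan_load4_noabort.entry)
    (h_load1 : Asan.SmallCheck Lay μ Vorbis.WayInv (Vorbis.CodeOK u₀) [.rax, .rdx] 1 Vorbis.L.__asan_load1_noabort.entry)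
    (h_load2 : Asan.SmallCheck Lay μ Vorbis.WayInv (Vorbis.CodeOK u₀) [.rax, .rcx, .rdx] 2 Vorbis.L.__asan_load2_noabort.entry)
    {g : G} (hent : Entered u₀ g) (pass cs i pcount : Nat) (v : State)
    (hat : AtTurn u₀ g pass cs i pcount v) :
    ReachVia Lay μ WayInv v (fun v' => ∃ b, AtSign6 u₀ g pass cs i pcount b v') := by
  obtain ⟨hrip, hc, hch3, hr12, hpath, hr15, hr13, hslcs, hwi, hinter, hi, hp⟩ := hat
  have he := hent.entry
  v_entry he
  have hroom := hent.room
  have w_rip := hrip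
  have b_rsp := hc.rsp
  have b_rbp := hc.rbp
  have w_eq : Mem.EqOn Vorbis.L.textLo Vorbis.L.textHi u₀.mem v.mem := hc.code
  have hdf : v.flags .df = false := (show abiInv _ from hc.inv).1
  have hmx : v.mxcsr &&& 0x1F80 = 0x1F80 := (show abiInv _ from hc.inv).2
  have hsse := Vorbis.sseOK_of_abiInv hc.inv
  have l_pass := hpath.sl_pass
  have l_pcd := hc.fr_pcd
  obtain ⟨hrw1, hrw2, hrw3⟩ := rec_where hent
  obtain ⟨htw1, htw2, htw3⟩ := tb_where hc
  have b_r12 : v.reg .r12 = addr g.r := hr12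
  obtain ⟨bg, hbg⟩ : ∃ bg, Residue.begin v.mem g.r = bg := ⟨_, rfl⟩
  obtain ⟨ps, hps⟩ : ∃ ps, Residue.part_size v.mem g.r = ps := ⟨_, rfl⟩
  have l_bg : v.mem.readLE (addr g.r) 4 = bg := by
    rw [← hbg]
    simp only [vacc, voff]
    rfl
  have l_ps : v.mem.readLE (addr g.r + 8) 4 = ps := by
    rw [← hps]
    simp only [vfield, vacc, voff]
  have hrn : (addr g.r).toNat = g.r := toNat_addr _ (by omega)
  obtain ⟨hn4096, hchC, hC16⟩ := arg_bounds hent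
  have hprd8192 := prd_le hent
  have hC : 0 < g.C := by omega
  have l_row : v.mem.readLE (UInt64.ofNat g.TB.base) 8 = rowBase g.TB g.C g.PRD 0 := by
    have h := hc.tb.rows 0 hC
    exact h
  have htn : (UInt64.ofNat g.TB.base).toNat = g.TB.base := toNat_addr _ (by omega)
  have hW := hc.w_pos hent
  have hcs_lt := hwi.slot_lt hW
  have hres := hc.resAt hent
  have hR : ResidueOK g.Blk v.mem g.f := hc.point.vorbis.residue
  have hL : BlkLive g.Blk g.Live' := hc.point.env.live
  have hrnlt := hc.rn_lt hent
  have hcfg := hc.config_at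
  have hTBl : g.TB.live g.Live' := hc.point.busy.ok.tblock_live_inv hc.shadow hc.tblock
  -- the slot `part_classdata[0][class_set]` and the row pointer in it
  have hsin := slot_inside g.TB hC hcs_lt hc.tb.size
  obtain ⟨rp, hrp⟩ : ∃ rp, v.mem.ptr (slot g.TB g.C g.PRD 0 cs) = rp := ⟨_, rfl⟩
  have hrow : RowPtr v.mem g.f g.r rp := by
    rw [← hrp]
    exact hwi.rowptr hW (j := 0) rfl
  have l_slot : v.mem.readLE (addr (slot g.TB g.C g.PRD 0 cs)) 8 = rp := hrp
  have hsn : (addr (slot g.TB g.C g.PRD 0 cs)).toNat = slot g.TB g.C g.PRD 0 cs := toNat_addr _ (by omega)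
  obtain ⟨q, hq, hrq⟩ := hrow
  have hBrow := hres.R8a_row q hq
  have hrowin := hc.point.env.ok.inside _ hBrow
  have hrowst := hent.pre.free.offStack _ hBrow
  rw [← hrq, hc.w_eq] at hBrow hrowin hrowst
  simp only [] at hrowin hrowst
  have hrow : RowPtr v.mem g.f g.r rp := ⟨q, hq, hrq⟩
  obtain ⟨c, hcb⟩ : ∃ c, v.mem.u8 (rp + i) = c := ⟨_, rfl⟩
  have hclt : c < Residue.classifications v.mem g.r := by
    rw [← hcb]
    exact hrow.class_lt hres (by rw [hc.w_eq]; exact hi)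
  have l_c : v.mem.readLE (addr (rp + i)) 1 = c := hcb
  have hcn : (addr (rp + i)).toNat = rp + i := toNat_addr _ (by omega)
  have hWlt := w_lt g
  obtain ⟨rbks, hrbks⟩ : ∃ rbks, Residue.residue_books v.mem g.r = rbks := ⟨_, rfl⟩
  have l_rbks : v.mem.readLE (addr g.r + 24) 8 = rbks := by
    rw [← hrbks]
    simp only [vfield, vacc, voff]
  have hB8 := hres.R8
  have hb8in := hc.point.env.ok.inside _ hB8
  have hb8st := hent.pre.free.offStack _ hB8
  rw [hrbks] at hB8 hb8in hb8st
  simp only [] at hb8in hb8st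
  have h6 := hres.R6
  have hc256 : c < 256 := by omega
  have hpass7 := hpath.pass_le
  obtain ⟨b, hb⟩ : ∃ b, v.mem.u16 (rbks + 16 * c + 2 * pass) = b := ⟨_, rfl⟩
  have ea : addr (rbks + 16 * c) + addr pass * 2 = addr (rbks + 16 * c + 2 * pass) := by
    rw [addr_mul_lit, addr_add_addr]
    congr 1
    omega
  have l_b : v.mem.readLE (addr (rbks + 16 * c) + addr pass * 2) 2 = b := by
    rw [ea]
    exact hb
  have hbn : (addr (rbks + 16 * c) + addr pass * 2).toNat = rbks + 16 * c + 2 * pass := by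
    rw [ea]
    exact toNat_addr _ (by omega)
  have hblt : b < 65536 := by
    rw [← hb]
    exact Mem.u16_lt _ _
  have hbook : sint16 b = -1 ∨ (0 ≤ sint16 b ∧ sint16 b < stb_vorbis.codebook_count v.mem g.f) := by
    have h := hres.R8c c pass hclt (by omega)
    have e : Residue.book v.mem g.r c pass = sint16 b := by
      unfold Residue.book
      rw [hrbks]
      show sint16 (v.mem.u16 (rbks + 16 * c + 2 * pass)) = _
      rw [hb]
    rw [e] at h
    exact h
  obtain ⟨hK1, hK2, hK3⟩ := factK_A hent hc hpath.rtype2 hpath.ch_ge hp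
  rw [hbg, hps] at hK2 hK3
  rw [hps] at hK1
  clear hr12
  u_walk hcode [hμ.vendor] until [stopSlot] span [Vorbis.L.textLo, Vorbis.L.textHi] side (v_side)
  case check_10f57c =>
    -- `r->begin`
    have hun : ShadowUntouched v.mem s_10f57c.mem := by v_untouched
    have hs : Site g.Live' g.r 4 := hR.site_record hL hrnlt 0 4 (by simp only [voff]; omega) (by omega) (by rw [hcfg]; omega)
    exact check_site hc.shadow hun hs hrn
  case check_10f58a =>
    -- `r->part_size`
    have hun : ShadowUntouched v.mem s_10f58a.mem := by v_untouched
    have hs : Site g.Live' (g.r + 8) 4 := hR.site_record hL hrnlt 8 4 (by simp only [voff]; omega) (by omega) (by rw [hcfg])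
    refine check_site hc.shadow hun hs ?_
    u_omega
  case check_10f5b1 =>
    -- `part_classdata[0]`, the row pointer of TB
    have hun : ShadowUntouched v.mem s_10f5b1.mem := by v_untouched
    have hs : Site g.Live' g.TB.base 8 := hc.tb.site_rowptr hTBl hC (by omega)
    exact check_site hc.shadow hun hs htn
  -- 0x10f5c4: rbx = &part_classdata[0][class_set]
  have w_rbx' : s_10f5c1.reg .rbx = addr (slot g.TB g.C g.PRD 0 cs) := by
    have e3 : Word.ofBV (BitVec.signExtend 64 (BitVec.ofNat 32 cs)) <<< 3 = addr (2 ^ 3 * cs) :=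
      sext_shl cs 3 (by omega) (by omega)
    rw [w_rbx, e3]
    show addr (2 ^ 3 * cs) + addr (rowBase g.TB g.C g.PRD 0) = _
    rw [addr_add_addr]
    congr 1
    unfold slot
    omega
  clear w_rbx
  have w_rbx := w_rbx'
  clear w_rbx'
  u_walk hcode [hμ.vendor] until [stopClass] span [Vorbis.L.textLo, Vorbis.L.textHi] side (v_side)
  case check_10f5c7 =>
    -- the slot `part_classdata[0][class_set]`
    have hun : ShadowUntouched v.mem s_10f5c7.mem := by v_untouched
    have hs : Site g.Live' (slot g.TB g.C g.PRD 0 cs) 8 := hc.tb.site_slot hTBl hC hcs_lt (hc.tb.slot_eq hC cs).symm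
    exact check_site hc.shadow hun hs hsn
  -- 0x10f5d8: rbx = rcx = the address of the class byte
  have w_rbx' : s_10f5d5.reg .rbx = addr (rp + i) := by
    rw [w_rbx, sext_part i (by omega)]
    show addr i + addr rp = _
    rw [addr_add_addr, Nat.add_comm]
  have w_rcx' : s_10f5d5.reg .rcx = addr (rp + i) := by
    rw [w_rcx, sext_part i (by omega)]
    show addr i + addr rp = _
    rw [addr_add_addr, Nat.add_comm]
  clear w_rbx w_rcx
  have w_rbx := w_rbx'
  have w_rcx := w_rcx'
  clear w_rbx' w_rcx'
  u_walk hcode [hμ.vendor] until [stopBook] span [Vorbis.L.textLo, Vorbis.L.textHi] side (v_side)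
  case check_10f5db =>
    -- the class byte `part_classdata[0][class_set][i]`
    have hun : ShadowUntouched v.mem s_10f5db.mem := by v_untouched
    have hs : Site g.Live' (rp + i) 1 := hrow.site hL hres (by rw [hc.w_eq]; exact hi) rfl
    exact check_site hc.shadow hun hs hcn
  case check_10f5e8 =>
    -- `r->residue_books`
    have hun : ShadowUntouched v.mem s_10f5e8.mem := by v_untouched
    have hs : Site g.Live' (g.r + 24) 8 := hR.site_record hL hrnlt 24 8 (by simp only [voff]; omega) (by omega) (by rw [hcfg])
    refine check_site hc.shadow hun hs ?_
    u_omega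
  -- 0x10f600: rbx = &residue_books[c], r14 = pass
  have w_rbx' : s_10f5f9.reg .rbx = addr (rbks + 16 * c) := by
    rw [w_rbx, zext_shl4 c hc256]
    show addr (16 * c) + addr rbks = _
    rw [addr_add_addr, Nat.add_comm]
  have w_r14' : s_10f5f9.reg .r14 = addr pass := by
    rw [w_r14, sext32_small6 pass (by omega)]
  clear w_rbx w_r14
  have w_rbx := w_rbx'
  have w_r14 := w_r14'
  clear w_rbx' w_r14'
  u_walk hcode [hμ.vendor] until [stopSign] span [Vorbis.L.textLo, Vorbis.L.textHi] side (v_side)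
  case check_10f604 =>
    -- `residue_books[c][pass]`
    have hun : ShadowUntouched v.mem s_10f604.mem := by v_untouched
    have hs : Site g.Live' (rbks + 16 * c + 2 * pass) 2 := hres.site_book hL hclt (k := pass) (by omega) (by rw [hrbks])
    exact check_site hc.shadow hun hs hbn
  -- 0x10f60e: the assertion `AtSign6`
  have hs : Mem.SameExcept (ownWins g) v.mem s_10f609.mem := by
    show Mem.SameExcept [⟨(g.e.reg .rsp).toNat - 848, (g.e.reg .rsp).toNat - 248⟩,
      ⟨(g.e.reg .rsp).toNat - 224, (g.e.reg .rsp).toNat - 220⟩,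
      ⟨(g.e.reg .rsp).toNat - 192, (g.e.reg .rsp).toNat - 188⟩, ⟨(g.e.reg .rsp).toNat - 160, (g.e.reg .rsp).toNat - 156⟩,
      ⟨(g.e.reg .rsp).toNat - 104, (g.e.reg .rsp).toNat - 100⟩, ⟨(g.e.reg .rsp).toNat - 88, (g.e.reg .rsp).toNat - 84⟩]
      v.mem s_10f609.mem
    u_same
  have hc' : Common u₀ g s_10f609 :=
    common_of_stack hent hc hs ((w_kept .rbp rfl).trans b_rbp) w_rsp w_eq (by v_inv)
  have hwi' := winner_of_stack hent hc hs (by omega) hwi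
  have hpath' := patha_of_stack hent hs hpath
  have hinter' : InterAt s_10f609.mem g.ci g.pi g.ch g.n := by
    have ea : addr (g.RA - 104) = g.e.reg .rsp - 104 := addr_slot g hroom.1 104 (by omega)
    have eb : addr (g.RA - 88) = g.e.reg .rsp - 88 := addr_slot g hroom.1 88 (by omega)
    apply hinter.frame
    · show sint32 (s_10f609.mem.readLE (addr (g.RA - 104)) 4) = sint32 (v.mem.readLE (addr (g.RA - 104)) 4)
      rw [ea]
      congr 1
      u_resolve
    · show sint32 (s_10f609.mem.readLE (addr (g.RA - 88)) 4) = sint32 (v.mem.readLE (addr (g.RA - 88)) 4)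
      rw [eb]
      congr 1
      u_resolve
  have sl_cs : s_10f609.mem.readLE (g.e.reg .rsp - 224) 4 = cs := by u_resolve
  have e_ps : Residue.part_size g.e.mem g.r = ps := by
    rw [← hc.reads.part_size]
    exact hps
  have e_bg : Residue.begin g.e.mem g.r = bg := by
    rw [← hc.reads.begin]
    exact hbg
  have sl_psz : s_10f609.mem.readLE (g.e.reg .rsp - 192) 4 = Residue.part_size g.e.mem g.r := by
    rw [e_ps]
    u_resolve
    rw [toNat_ofNat32 ps (by omega)]
    exact Nat.mod_eq_of_lt (by omega)
  have sl_z : s_10f609.mem.readLE (g.e.reg .rsp - 160) 4 =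
      Residue.begin g.e.mem g.r + pcount * Residue.part_size g.e.mem g.r := by
    rw [e_ps, e_bg]
    u_resolve
    rw [z_lea, BitVec.toNat_mul, toNat_ofNat32 bg (by omega), toNat_ofNat32 ps (by omega), Asan.part32_toNat,
      UInt64.toNat_ofNat']
    have e1 : pcount % 2 ^ 64 % 2 ^ 32 = pcount := by omega
    rw [e1]
    have e2 : ps * pcount = pcount * ps := Nat.mul_comm _ _
    rw [e2]
    have h1 : pcount * ps < 2 ^ 32 := by omega
    rw [Nat.mod_eq_of_lt h1]
    have h2 : bg + pcount * ps < 2 ^ 32 := by omega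
    rw [Nat.mod_eq_of_lt h2]
    exact Nat.mod_eq_of_lt (by omega)
  have e_rbx : s_10f609.reg .rbx = UInt64.ofNat b := by
    rw [w_rbx]
    apply UInt64.toNat_inj.mp
    unfold Word.ofBV
    simp only [UInt64.toNat_ofBitVec, BitVec.zeroExtend, BitVec.toNat_setWidth, BitVec.toNat_ofNat, UInt64.toNat_ofNat']
    omega
  have e_cc : stb_vorbis.codebook_count s_10f609.mem g.f = stb_vorbis.codebook_count v.mem g.f :=
    hc'.reads.codebook_count.trans hc.reads.codebook_count.symm
  refine ReachVia.done ⟨b, w_rip, hc', hch3, (w_kept .r12 rfl).trans b_r12, hpath', (w_kept .r15 rfl).trans hr15,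
    (w_kept .r13 rfl).trans hr13, sl_cs, hwi', hinter', hi, hp, sl_psz, sl_z, e_rbx, hblt, ?_⟩
  rw [e_cc]
  exact hbook

/-! ### The sign test, the `b < 0` arm with its `idiv`, the latch; the composition -/

/-- **The sign test of `b` and the `b < 0` arm** (0x10f60e … 0x10f634, the latch 0x10f549 / 0x10f54d; C 2237, 2242–2246, 2229):
bit 15 clear → the call arm at 0x10f4ed with nothing changed (`AtCall6`); bit 15 set → `z += part_size`, `cdq ; idiv ch` (no `#DE`),
CI again, `++i, ++pcount`: the loop head. -/
theorem arm6 {Lay : Layout} (hLay : Lay.hi = 0x1000000) {μ : Microarch} (hμ : UserX.MicroOK μ) {u₀ : State}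
    (hcode : HasCodeNat Lay u₀ Vorbis.L.decode_residue.entry Vorbis.Code.code_decode_residue.nat Vorbis.L.decode_residue.size)
    {g : G} (hent : Entered u₀ g) (pass cs i pcount b : Nat) (v : State)
    (hat : AtSign6 u₀ g pass cs i pcount b v) :
    ReachVia Lay μ WayInv v (fun v' => (∃ b, AtCall6 u₀ g pass cs i pcount b v') ∨
      AtInner u₀ g pass cs (i + 1) (pcount + 1) v') := by
  obtain ⟨hrip, hc, hch3, hr12, hpath, hr15, hr13, hslcs, hwi, hinter, hi, hp, hslpsz, hslz, hrbx, hblt, hbook⟩ := hat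
  have he := hent.entry
  v_entry he
  have hroom := hent.room
  have w_rip := hrip
  have b_rsp := hc.rsp
  have b_rbp := hc.rbp
  have w_eq : Mem.EqOn Vorbis.L.textLo Vorbis.L.textHi u₀.mem v.mem := hc.code
  have hdf : v.flags .df = false := (show abiInv _ from hc.inv).1
  have hmx : v.mxcsr &&& 0x1F80 = 0x1F80 := (show abiInv _ from hc.inv).2
  have hsse := Vorbis.sseOK_of_abiInv hc.inv
  obtain ⟨psz, hpsz⟩ : ∃ psz, Residue.part_size g.e.mem g.r = psz := ⟨_, rfl⟩
  obtain ⟨bgn, hbgn⟩ : ∃ bgn, Residue.begin g.e.mem g.r = bgn := ⟨_, rfl⟩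
  rw [hpsz] at hslpsz
  rw [hpsz, hbgn] at hslz
  have l_ch := hc.fr_ch
  obtain ⟨hn4096, hchC, hC16⟩ := arg_bounds hent
  have hprd8192 := prd_le hent
  have hW := hc.w_pos hent
  have hWlt := w_lt g
  obtain ⟨hK1, hK2, hK3⟩ := factK_A hent hc hpath.rtype2 hpath.ch_ge hp
  rw [hc.reads.begin, hc.reads.part_size, hbgn, hpsz] at hK2 hK3
  rw [hc.reads.part_size, hpsz] at hK1
  u_walk hcode [hμ.vendor] until [Vorbis.L.decode_residue.at_10f4ed, idivArm] span [Vorbis.L.textLo, Vorbis.L.textHi] side (v_side)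
  · -- bit 15 clear: `b ≥ 0`, the call arm at 0x10f4ed, nothing changed
    have hb15 : b < 32768 := (bit15 b hblt).mp hbr_10f613
    have hs : Mem.SameExcept (ownWins g) v.mem s_10f613.mem := by
      rw [w_mem]
      exact Mem.SameExcept.refl _ _
    have hc' : Common u₀ g s_10f613 :=
      common_of_stack hent hc hs ((w_kept .rbp rfl).trans b_rbp) ((w_kept .rsp rfl).trans b_rsp) w_eq (by v_inv)
    have e16 : sint16 b = (b : Int) := by
      unfold sint16
      rw [if_pos (by omega)]
    have hbook' : (b : Int) < stb_vorbis.codebook_count s_10f613.mem g.f := by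
      rw [w_mem]
      rw [e16] at hbook
      rcases hbook with h | h
      · omega
      · exact h.2
    refine ReachVia.done (Or.inl ⟨b, w_rip.trans (by decide), hc', hch3, (w_kept .r12 rfl).trans hr12, patha_of_stack hent hs hpath,
      (w_kept .r15 rfl).trans hr15, (w_kept .r13 rfl).trans hr13, ?_, ?_, ?_, hi, hp, ?_, (w_kept .rbx rfl).trans hrbx, hb15, hbook'⟩)
    · rw [w_mem]
      exact hslcs
    · rw [w_mem]
      exact hwi
    · rw [w_mem]
      exact hinter
    · rw [w_mem, hpsz]
      exact hslpsz
  · -- bit 15 set: `z += part_size`; 0x10f628, before the `idiv`: the divisor is named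
    have hd : s_10f627.mem.readLE (g.e.reg .rsp - 156) 4 = g.ch := by
      rw [w_mem]
      exact l_ch
    have ez : BitVec.ofNat 32 psz + BitVec.ofNat 32 (bgn + pcount * psz) = BitVec.ofNat 32 (psz + (bgn + pcount * psz)) :=
      (BitVec.ofNat_add _ _).symm
    rw [ez] at w_rax w_rdx
    u_walk hcode [hμ.vendor] until [Vorbis.L.decode_residue.cut21] span [Vorbis.L.textLo, Vorbis.L.textHi] side (v_side)
    case side_nofault =>
      have hq := idiv_nat (psz + (bgn + pcount * psz)) g.ch (by omega) (by omega) (by omega)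
      have hcontra := hopt1.symm.trans hq
      cases hcontra
    -- after the `idiv`: the two ints, the latch
    have hq := idiv_nat (psz + (bgn + pcount * psz)) g.ch (by omega) (by omega) (by omega)
    have eqr := Option.some.inj (hopt_10f628.symm.trans hq)
    have hs : Mem.SameExcept (ownWins g) v.mem s_10f54d.mem := by
      show Mem.SameExcept [⟨(g.e.reg .rsp).toNat - 848, (g.e.reg .rsp).toNat - 248⟩,
        ⟨(g.e.reg .rsp).toNat - 224, (g.e.reg .rsp).toNat - 220⟩,
        ⟨(g.e.reg .rsp).toNat - 192, (g.e.reg .rsp).toNat - 188⟩, ⟨(g.e.reg .rsp).toNat - 160, (g.e.reg .rsp).toNat - 156⟩,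
        ⟨(g.e.reg .rsp).toNat - 104, (g.e.reg .rsp).toNat - 100⟩, ⟨(g.e.reg .rsp).toNat - 88, (g.e.reg .rsp).toNat - 84⟩]
        v.mem s_10f54d.mem
      u_same
    have hcom : Common u₀ g s_10f54d :=
      common_of_stack hent hc hs ((w_kept .rbp rfl).trans b_rbp) ((w_kept .rsp rfl).trans b_rsp) w_eq (by v_inv)
    have hmodle : (psz + (bgn + pcount * psz)) % g.ch ≤ 8192 := by
      have := Nat.mod_le (psz + (bgn + pcount * psz)) g.ch
      omega
    have hdivle : (psz + (bgn + pcount * psz)) / g.ch ≤ 8192 := by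
      have := Nat.div_le_self (psz + (bgn + pcount * psz)) g.ch
      omega
    have eC : (BitVec.ofNat 32 ((psz + (bgn + pcount * psz)) % g.ch)).toNat = (psz + (bgn + pcount * psz)) % g.ch := by
      rw [BitVec.toNat_ofNat]
      exact Nat.mod_eq_of_lt (by omega)
    have eP : (BitVec.ofNat 32 ((psz + (bgn + pcount * psz)) / g.ch)).toNat = (psz + (bgn + pcount * psz)) / g.ch := by
      rw [BitVec.toNat_ofNat]
      exact Nat.mod_eq_of_lt (by omega)
    have hci : s_10f54d.mem.readLE (g.e.reg .rsp - 104) 4 = (psz + (bgn + pcount * psz)) % g.ch := by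
      rw [w_mem, eqr]
      simp only [eC, eP]
      u_read
    have hpi : s_10f54d.mem.readLE (g.e.reg .rsp - 88) 4 = (psz + (bgn + pcount * psz)) / g.ch := by
      rw [w_mem, eqr]
      simp only [eC, eP]
      u_read
    have hinter' : InterAt s_10f54d.mem g.ci g.pi g.ch g.n :=
      inter_of_z hent (by omega) (by omega) (by omega) hci hpi
    have hwi' := winner_of_stack hent hc hs (by omega) hwi
    have hcs' : s_10f54d.mem.readLE (g.e.reg .rsp - 224) 4 = cs := by
      u_resolve
    refine ReachVia.done (Or.inr ⟨w_rip, hcom, hch3, (w_kept .r12 rfl).trans hr12, patha_of_stack hent hs hpath, ?_, ?_, hcs',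
      hwi'.step hi hp, hinter'⟩)
    · rw [w_r15]
      exact incr32 pcount (by omega)
    · rw [w_r13]
      exact incr32 i (by omega)

/-- **decode_residue.6ba from its two walks**: the front (`front6`), then the sign test and the `b < 0` arm (`arm6`). -/
theorem body6ba {Lay : Layout} (hLay : Lay.hi = 0x1000000) {μ : Microarch} (hμ : UserX.MicroOK μ) {u₀ : State}
    (hcode : HasCodeNat Lay u₀ Vorbis.L.decode_residue.entry Vorbis.Code.code_decode_residue.nat Vorbis.L.decode_residue.size)
    (h_load8 : Asan.SmallCheck Lay μ Vorbis.WayInv (Vorbis.CodeOK u₀) [.rax, .rcx, .rdx] 8 Vorbis.L.__asan_load8_noabort.entry)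
    (h_load4 : Asan.SmallCheck Lay μ Vorbis.WayInv (Vorbis.CodeOK u₀) [.rax, .rcx, .rdx] 4 Vorbis.L.__asan_load4_noabort.entry)
    (h_load1 : Asan.SmallCheck Lay μ Vorbis.WayInv (Vorbis.CodeOK u₀) [.rax, .rdx] 1 Vorbis.L.__asan_load1_noabort.entry)
    (h_load2 : Asan.SmallCheck Lay μ Vorbis.WayInv (Vorbis.CodeOK u₀) [.rax, .rcx, .rdx] 2 Vorbis.L.__asan_load2_noabort.entry)
    {g : G} (hent : Entered u₀ g) (pass cs i pcount : Nat) (v : State)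
    (hat : AtTurn u₀ g pass cs i pcount v) :
    ReachVia Lay μ WayInv v (fun v' => (∃ b, AtCall6 u₀ g pass cs i pcount b v') ∨
      AtInner u₀ g pass cs (i + 1) (pcount + 1) v') := by
  refine (front6 hLay hμ hcode h_load8 h_load4 h_load1 h_load2 hent pass cs i pcount v hat).trans ?_
  intro v1 h1
  obtain ⟨b, hb⟩ := h1
  exact arm6 hLay hμ hcode hent pass cs i pcount b v1 hb

end Vorbis.Spec.decode_residue_6ba
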